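-- pv_equiv track=rewrite | github.com/ulilu1372/Skillsmart | mytest10.py | PrintingCosts
-- ===== SOURCE A (Python) =====
-- def PrintingCosts(Line):
--     sum = 0
--     Line = Line.replace(' ', '')
--     Line = [x for x in Line]
--     for i in range(len(Line)):
--         if Line[i] == ' ':
--             sum += 0
--         elif Line[i] == '\'' or Line[i] == '`':
--             sum += 3
--         elif Line[i] == '.':
--             sum += 4
--         elif Line[i] == '\"':
--             sum += 6
--         elif Line[i] == ',' or Line[i] == '-' or Line[i] == '^':
--             sum += 7
--         elif Line[i] == ':' or Line[i] == '_':
--             sum += 8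
--         elif Line[i] == '!' or Line[i] == '~':
--             sum += 9
--         elif Line[i] == '>' or Line[i] == '\\' or Line[i] == '/' or Line[i] == '<':
--             sum += 10
--         elif Line[i] == ';':
--             sum += 11
--         elif Line[i] == '(' or Line[i] == '|' or Line[i] == ')':
--             sum += 12
--         elif Line[i] == 'v' or Line[i] == 'r' or Line[i] == 'x' or Line[i] == '+':
--             sum += 13
--         elif Line[i] == 'Y' or Line[i] == '=':
--             sum += 14
--         elif Line[i] == '?' or Line[i] == 'i':
--             sum += 15
--         elif Line[i] == 'L' or Line[i] == 'T' or Line[i] == 'l' or Line[i] == '7':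
--             sum += 16
--         elif Line[i] == 't' or Line[i] == 'c' or Line[i] == 'u' or Line[i] == '*':
--             sum += 17
--         elif Line[i] == 'J' or Line[i] == 'n' or Line[i] == ']' or Line[i] == '{' or Line[i] == 'X' or Line[i] == '}' or Line[i] == 'f' or Line[i] == 'I' or Line[i] == '[':
--             sum += 18
--         elif Line[i] == 'V' or Line[i] == 'z' or Line[i] == 'w' or Line[i] == '1':
--             sum += 19
--         elif Line[i] == 'o' or Line[i] == 'F' or Line[i] == 'j' or Line[i] == 'C':
--             sum += 20
--         elif Line[i] == 'h' or Line[i] == 'K' or Line[i] == '4' or Line[i] == 'k' or Line[i] == 's':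
--             sum += 21
--         elif Line[i] == '2' or Line[i] == 'Z' or Line[i] == '%' or Line[i] == 'm' or Line[i] == '0':
--             sum += 22
--         elif Line[i] == '8' or Line[i] == 'P' or Line[i] == '3' or Line[i] == 'e' or Line[i] == 'U' or Line[i] == 'a':
--             sum += 23
--         elif Line[i] == '&' or Line[i] == '#' or Line[i] == 'A' or Line[i] == 'y':
--             sum += 24
--         elif Line[i] == 'b' or Line[i] == 'd' or Line[i] == 'p' or Line[i] == 'G' or Line[i] == 'S' or Line[i] == 'q' or Line[i] == 'H' or Line[i] == 'N':
--             sum += 25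
--         elif Line[i] == 'D' or Line[i] == '9' or Line[i] == 'E' or Line[i] == 'W' or Line[i] == '6' or Line[i] == 'O':
--             sum += 26
--         elif Line[i] == '5':
--             sum += 27
--         elif Line[i] == 'R' or Line[i] == 'M':
--             sum += 28
--         elif Line[i] == '$' or Line[i] == 'B':
--             sum += 29
--         elif Line[i] == 'g':
--             sum += 30
--         elif Line[i] == 'Q':
--             sum += 31
--         elif Line[i] == '@':
--             sum += 32
--         else:
--             sum += 23
--     return sum
-- ===== SOURCE B (Python) =====
-- # Cost tiers: (cost, characters with that cost).  The 23-cost tier is absent on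
-- # purpose: 23 is also the catch-all cost, so it coincides with the baseline.
-- TIERS = [
--     (0, " "),
--     (3, "'`"), (4, "."), (6, '"'), (7, ",-^"), (8, ":_"), (9, "!~"),
--     (10, ">\\/<"), (11, ";"), (12, "(|)"), (13, "vrx+"), (14, "Y="),
--     (15, "?i"), (16, "LTl7"), (17, "tcu*"), (18, "Jn]{X}fI["),
--     (19, "Vzw1"), (20, "oFjC"), (21, "hK4ks"), (22, "2Z%m0"),
--     (24, "&#Ay"), (25, "bdpGSqHN"), (26, "D9EW6O"), (27, "5"),
--     (28, "RM"), (29, "$B"), (30, "g"), (31, "Q"), (32, "@"),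
-- ]
--
-- def PrintingCosts(Line):
--     # Baseline: every character costs the catch-all 23; then for each cost tier
--     # correct the baseline by (cost - 23) per occurrence of a tier character.
--     total = 23 * len(Line)
--     for cost, chars in TIERS:
--         for ch in chars:
--             total += (cost - 23) * Line.count(ch)
--     return total
-- ===== Notes on version B (the rewrite author's own statement) =====
-- stated objective: faster
-- what changed: Instead of dispatching each character through a 30-branch elif cascade, B starts from a baseline of 23 per character (the catch-all cost) and iterates over the cost TIERS, correcting the total by (cost-23)*Line.count(ch) per tier character, so the per-character Python-level dispatch disappears.
import Mathlib
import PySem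

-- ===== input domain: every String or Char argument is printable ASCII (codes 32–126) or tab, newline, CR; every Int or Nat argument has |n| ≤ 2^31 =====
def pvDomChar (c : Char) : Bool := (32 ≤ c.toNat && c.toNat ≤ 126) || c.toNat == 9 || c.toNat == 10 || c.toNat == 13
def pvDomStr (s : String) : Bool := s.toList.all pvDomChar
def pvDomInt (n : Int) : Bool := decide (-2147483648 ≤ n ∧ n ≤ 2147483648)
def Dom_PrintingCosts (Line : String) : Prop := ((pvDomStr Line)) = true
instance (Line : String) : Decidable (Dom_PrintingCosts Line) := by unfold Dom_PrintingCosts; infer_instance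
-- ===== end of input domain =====

-- B replaces A's per-character 30-branch elif cascade by a baseline of 23 per character
-- plus per-tier corrections (cost-23)*count(ch): a different, tier-driven algorithm.

-- ===== PORT A =====
-- the loop body of A: the if/elif cascade on one character, kept branch for branch
def pvChainA (c : Char) : Int :=
  if c = ' ' then 0
  else if c = '\'' ∨ c = '`' then 3
  else if c = '.' then 4
  else if c = '"' then 6
  else if c = ',' ∨ c = '-' ∨ c = '^' then 7
  else if c = ':' ∨ c = '_' then 8
  else if c = '!' ∨ c = '~' then 9
  else if c = '>' ∨ c = '\\' ∨ c = '/' ∨ c = '<' then 10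
  else if c = ';' then 11
  else if c = '(' ∨ c = '|' ∨ c = ')' then 12
  else if c = 'v' ∨ c = 'r' ∨ c = 'x' ∨ c = '+' then 13
  else if c = 'Y' ∨ c = '=' then 14
  else if c = '?' ∨ c = 'i' then 15
  else if c = 'L' ∨ c = 'T' ∨ c = 'l' ∨ c = '7' then 16
  else if c = 't' ∨ c = 'c' ∨ c = 'u' ∨ c = '*' then 17
  else if c = 'J' ∨ c = 'n' ∨ c = ']' ∨ c = '{' ∨ c = 'X' ∨ c = '}' ∨ c = 'f' ∨ c = 'I' ∨ c = '[' then 18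
  else if c = 'V' ∨ c = 'z' ∨ c = 'w' ∨ c = '1' then 19
  else if c = 'o' ∨ c = 'F' ∨ c = 'j' ∨ c = 'C' then 20
  else if c = 'h' ∨ c = 'K' ∨ c = '4' ∨ c = 'k' ∨ c = 's' then 21
  else if c = '2' ∨ c = 'Z' ∨ c = '%' ∨ c = 'm' ∨ c = '0' then 22
  else if c = '8' ∨ c = 'P' ∨ c = '3' ∨ c = 'e' ∨ c = 'U' ∨ c = 'a' then 23
  else if c = '&' ∨ c = '#' ∨ c = 'A' ∨ c = 'y' then 24
  else if c = 'b' ∨ c = 'd' ∨ c = 'p' ∨ c = 'G' ∨ c = 'S' ∨ c = 'q' ∨ c = 'H' ∨ c = 'N' then 25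
  else if c = 'D' ∨ c = '9' ∨ c = 'E' ∨ c = 'W' ∨ c = '6' ∨ c = 'O' then 26
  else if c = '5' then 27
  else if c = 'R' ∨ c = 'M' then 28
  else if c = '$' ∨ c = 'B' then 29
  else if c = 'g' then 30
  else if c = 'Q' then 31
  else if c = '@' then 32
  else 23

def PrintingCosts (Line : String) : Int :=
  let sum0 : Int := 0
  let line1 := PySem.Str.replace Line " " ""          -- Line = Line.replace(' ', '')
  let cs := line1.toList                              -- Line = [x for x in Line]
  (PySem.List.pyRange 0 (cs.length : Int) 1).foldl    -- for i in range(len(Line)):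
    (fun s i => s + pvChainA (PySem.List.pyGetD cs i ' ')) sum0

-- ===== PORT B =====
-- the module-level TIERS list of Source B (the 23-cost tier is absent: it equals the baseline)
def pvTiers : List (Int × List Char) := [
  (0, [' ']),
  (3, ['\'', '`']), (4, ['.']), (6, ['"']), (7, [',', '-', '^']), (8, [':', '_']), (9, ['!', '~']),
  (10, ['>', '\\', '/', '<']), (11, [';']), (12, ['(', '|', ')']), (13, ['v', 'r', 'x', '+']), (14, ['Y', '=']),
  (15, ['?', 'i']), (16, ['L', 'T', 'l', '7']), (17, ['t', 'c', 'u', '*']),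
  (18, ['J', 'n', ']', '{', 'X', '}', 'f', 'I', '[']),
  (19, ['V', 'z', 'w', '1']), (20, ['o', 'F', 'j', 'C']), (21, ['h', 'K', '4', 'k', 's']), (22, ['2', 'Z', '%', 'm', '0']),
  (24, ['&', '#', 'A', 'y']), (25, ['b', 'd', 'p', 'G', 'S', 'q', 'H', 'N']), (26, ['D', '9', 'E', 'W', '6', 'O']), (27, ['5']),
  (28, ['R', 'M']), (29, ['$', 'B']), (30, ['g']), (31, ['Q']), (32, ['@'])]

-- Line.count(ch) for a single character ch is exactly the occurrence count List.count
def PrintingCosts_alt (Line : String) : Int :=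
  pvTiers.foldl
    (fun total t =>                                    -- for cost, chars in TIERS:
      t.2.foldl                                        --   for ch in chars:
        (fun total ch => total + (t.1 - 23) * (Line.toList.count ch : Int))
        total)
    (23 * (PySem.Str.len Line : Int))                  -- total = 23 * len(Line)

-- ===== PRECONDITION & SPEC =====
def Spec_PrintingCosts (Line : String) (out : Int) : Prop := out = PrintingCosts_alt Line
instance (Line : String) (out : Int) : Decidable (Spec_PrintingCosts Line out) := by unfold Spec_PrintingCosts; infer_instance

-- ===== CLAIM (what is proved, stated in full; the proofs are below) =====
def Claim_equal_PrintingCosts : Prop := ∀ (Line : String), Dom_PrintingCosts Line → Spec_PrintingCosts Line (PrintingCosts Line)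

-- ===== LEMMAS AND PROOFS =====

-- total correction B applies for a list of characters l
def pvAdjSum (l : List Char) : Int :=
  (pvTiers.map (fun t => (t.2.map (fun ch => (t.1 - 23) * (l.count ch : Int))).sum)).sum

-- correction a single character c contributes
def pvAdjChar (c : Char) : Int :=
  (pvTiers.map (fun t => (t.2.map (fun ch => (t.1 - 23) * (if c = ch then (1:Int) else 0))).sum)).sum

lemma pvAdjSum_nil : pvAdjSum [] = 0 := by rfl

-- one tier's correction splits off the head character's contribution
lemma pv_tier_cons (w : Int) (chs : List Char) (c : Char) (t : List Char) :
    (chs.map (fun ch => w * (((c :: t).count ch : Nat) : Int))).sum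
      = (chs.map (fun ch => w * (if c = ch then (1:Int) else 0))).sum
        + (chs.map (fun ch => w * ((t.count ch : Nat) : Int))).sum := by
  have hpt : ∀ ch ∈ chs, w * (((c :: t).count ch : Nat) : Int)
      = w * (if c = ch then (1:Int) else 0) + w * ((t.count ch : Nat) : Int) := by
    intro ch _
    rw [List.count_cons]
    by_cases hc : c = ch
    · simp [hc]; ring
    · have : (c == ch) = false := beq_eq_false_iff_ne.mpr hc
      simp [this, hc]
  rw [List.map_congr_left hpt, PySem.List.sum_map_add_int]

lemma pvAdjSum_cons (c : Char) (t : List Char) :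
    pvAdjSum (c :: t) = pvAdjChar c + pvAdjSum t := by
  simp only [pvAdjSum, pvAdjChar]
  have hpt : ∀ p ∈ pvTiers,
      ((p.2.map (fun ch => (p.1 - 23) * (((c :: t).count ch : Nat) : Int))).sum)
        = (p.2.map (fun ch => (p.1 - 23) * (if c = ch then (1:Int) else 0))).sum
          + (p.2.map (fun ch => (p.1 - 23) * ((t.count ch : Nat) : Int))).sum := by
    intro p _
    exact pv_tier_cons (p.1 - 23) p.2 c t
  rw [List.map_congr_left hpt, PySem.List.sum_map_add_int]

-- all characters the tiers mention, flattened
def pvAllChars : List Char :=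
  [' ', '\'', '`', '.', '"', ',', '-', '^', ':', '_', '!', '~', '>', '\\', '/', '<', ';',
   '(', '|', ')', 'v', 'r', 'x', '+', 'Y', '=', '?', 'i', 'L', 'T', 'l', '7', 't', 'c', 'u', '*',
   'J', 'n', ']', '{', 'X', '}', 'f', 'I', '[', 'V', 'z', 'w', '1', 'o', 'F', 'j', 'C',
   'h', 'K', '4', 'k', 's', '2', 'Z', '%', 'm', '0', '&', '#', 'A', 'y',
   'b', 'd', 'p', 'G', 'S', 'q', 'H', 'N', 'D', '9', 'E', 'W', '6', 'O', '5',
   'R', 'M', '$', 'B', 'g', 'Q', '@']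

set_option maxHeartbeats 2000000 in
set_option maxRecDepth 10000 in
lemma pvChainA_eq_baseline (c : Char) : pvChainA c = 23 + pvAdjChar c := by
  by_cases h : c ∈ pvAllChars
  · fin_cases h <;> decide
  · simp only [pvAllChars, List.mem_cons, List.not_mem_nil, or_false, not_or] at h
    have hz : pvAdjChar c = 0 := by
      simp only [pvAdjChar, pvTiers, List.map_cons, List.map_nil, List.sum_cons, List.sum_nil]
      simp_all
    rw [hz]
    simp_all [pvChainA]

lemma pv_replace_go (fuel : Nat) (l acc : List Char) (h : l.length ≤ fuel) :
    PySem.Chars.replace.go [' '] [] fuel l acc = acc.reverse ++ l.filter (· ≠ ' ') := by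
  induction fuel generalizing l acc with
  | zero =>
    have : l = [] := List.length_eq_zero_iff.mp (Nat.le_zero.mp h)
    subst this; simp [PySem.Chars.replace.go]
  | succ n ih =>
    cases l with
    | nil => simp [PySem.Chars.replace.go]
    | cons c t =>
      by_cases hc : c = ' '
      · subst hc
        have hp : List.isPrefixOf [' '] (' ' :: t) = true := by
          simp [List.isPrefixOf]
        rw [PySem.Chars.replace.go]
        simp only [hp, if_true, List.reverse_nil, List.nil_append]
        have hd : List.drop [' '].length (' ' :: t) = t := rfl
        rw [hd, ih t acc (by simpa using Nat.le_of_succ_le_succ h)]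
        simp
      · have hp : List.isPrefixOf [' '] (c :: t) = false := by
          simp [List.isPrefixOf]; exact fun hcontra => hc hcontra.symm
        rw [PySem.Chars.replace.go]
        simp only [hp, Bool.false_eq_true, if_false]
        rw [ih t (c :: acc) (by simpa using Nat.le_of_succ_le_succ h)]
        simp [hc]

lemma pv_replace_space (cs : List Char) :
    PySem.Chars.replace cs [' '] [] = cs.filter (· ≠ ' ') := by
  rw [PySem.Chars.replace]
  simp only [List.isEmpty_cons, Bool.false_eq_true, if_false]
  exact pv_replace_go cs.length cs [] le_rfl

lemma pv_foldl_add_sum (f : Char → Int) (l : List Char) (i : Int) :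
    l.foldl (fun s c => s + f c) i = i + (l.map f).sum := by
  induction l generalizing i with
  | nil => simp
  | cons c t ih => simp [List.foldl_cons, ih, add_assoc]

lemma pv_sum_filter_space (f : Char → Int) (hf : f ' ' = 0) (l : List Char) :
    ((l.filter (· ≠ ' ')).map f).sum = (l.map f).sum := by
  induction l with
  | nil => rfl
  | cons c t ih =>
    by_cases hc : c = ' '
    · subst hc
      rw [List.filter_cons, if_neg (by simp)]
      rw [List.map_cons, List.sum_cons, hf, zero_add, ih]
    · rw [List.filter_cons, if_pos (by simp [hc])]
      rw [List.map_cons, List.map_cons, List.sum_cons, List.sum_cons, ih]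

-- B's nested tier fold computes baseline + total correction
lemma pvAlt_eq_adj (Line : String) :
    PrintingCosts_alt Line = 23 * (Line.toList.length : Int) + pvAdjSum Line.toList := by
  simp only [PrintingCosts_alt, pvAdjSum, pvTiers, PySem.Str.len_eq, List.foldl_cons,
    List.foldl_nil, List.map_cons, List.map_nil, List.sum_cons, List.sum_nil]
  ring

-- the baseline+correction form equals the per-character sum of A's cascade
lemma pv_baseline_eq_chain (l : List Char) :
    23 * (l.length : Int) + pvAdjSum l = (l.map pvChainA).sum := by
  induction l with
  | nil => simp [pvAdjSum_nil]
  | cons c t ih =>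
    rw [pvAdjSum_cons, List.map_cons, List.sum_cons, ← ih, pvChainA_eq_baseline]
    push_cast [List.length_cons]
    ring

-- ===== VERDICT (by name: the statement is the Claim_ definition above) =====
theorem PrintingCosts_spec : Claim_equal_PrintingCosts := by
  intro Line _
  show PrintingCosts Line = PrintingCosts_alt Line
  simp only [PrintingCosts]
  rw [PySem.List.foldl_pyRange_zero_pyGetD' ((PySem.Str.replace Line " " "").toList) ' ' (fun s c => s + pvChainA c) 0]
  rw [pv_foldl_add_sum, zero_add]
  have hcs : (PySem.Str.replace Line " " "").toList = Line.toList.filter (· ≠ ' ') := by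
    rw [PySem.Str.toList_replace]
    simpa using pv_replace_space Line.toList
  rw [hcs, pv_sum_filter_space _ (by rfl) Line.toList,
    pvAlt_eq_adj, pv_baseline_eq_chain]
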